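-- pv_equiv track=rewrite | github.com/LeonardoFGaldino/Axxen-Scripts | script retificação mais utilizados com retificador final/0150, 0190, 0500 Full.py | insert_0500_after_0450
-- ===== SOURCE A (Python) =====
-- def insert_0500_after_0450(linhas, registros_0500):
--     """Insere registros 0500 após o último registro 0450 e antes do registro 0990 em um arquivo SPED."""
--     novo_conteudo = []
--     inseriu_0500 = False
--     pos_0450 = 0
--
--     for i, linha in enumerate(linhas):
--         novo_conteudo.append(linha)
--         if linha.startswith('|0450|'):
--             pos_0450 = len(novo_conteudo)
--         elif linha.startswith('|0990|') and not inseriu_0500: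
--             novo_conteudo = novo_conteudo[:pos_0450] + registros_0500 + novo_conteudo[pos_0450:]
--             inseriu_0500 = True
--
--     if not inseriu_0500:
--         novo_conteudo = novo_conteudo[:pos_0450] + registros_0500 + novo_conteudo[pos_0450:]
--
--     return novo_conteudo
-- ===== SOURCE B (Python) =====
-- def insert_0500_after_0450(linhas, registros_0500):
--     """Insere registros 0500 após o último registro 0450 e antes do registro 0990 em um arquivo SPED."""
--     # Step 1: limite = index of the first '|0990|' line (len(linhas) if none).
--     limite = len(linhas)
--     for i, linha in enumerate(linhas):
--         if linha.startswith('|0990|'):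
--             limite = i
--             break
--     # Step 2: pos = 1 + index of the last '|0450|' line before limite (0 if none).
--     pos = 0
--     for i, linha in enumerate(linhas[:limite]):
--         if linha.startswith('|0450|'):
--             pos = i + 1
--     # Step 3: one splice.
--     return linhas[:pos] + registros_0500 + linhas[pos:]
-- ===== Notes on version B (the rewrite author's own statement) =====
-- stated objective: simpler
-- what changed: B computes the insertion index up front (first find the bound = index of the first '|0990|' line, then the last '|0450|' line before it) and splices the list once, instead of A's rebuild-list-element-by-element loop with a mid-loop reslice and post-loop fallback.
import Mathlib
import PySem

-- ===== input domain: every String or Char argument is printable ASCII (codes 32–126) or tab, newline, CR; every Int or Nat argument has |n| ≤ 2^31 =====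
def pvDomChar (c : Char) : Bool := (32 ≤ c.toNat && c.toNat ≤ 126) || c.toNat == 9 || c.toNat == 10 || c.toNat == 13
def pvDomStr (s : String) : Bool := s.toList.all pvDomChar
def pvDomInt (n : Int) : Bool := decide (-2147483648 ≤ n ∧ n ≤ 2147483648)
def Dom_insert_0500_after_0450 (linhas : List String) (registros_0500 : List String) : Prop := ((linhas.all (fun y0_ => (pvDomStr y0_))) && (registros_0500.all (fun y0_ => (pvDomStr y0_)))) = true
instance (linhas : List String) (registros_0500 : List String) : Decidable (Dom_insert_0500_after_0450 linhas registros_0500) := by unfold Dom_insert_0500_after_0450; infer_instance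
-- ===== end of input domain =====

-- B computes one insertion index up front (first-|0990| bound, then last |0450| before it) and splices once,
-- instead of A's append-every-line loop with a mid-loop reslice; objective: simpler decomposition, same cost.


-- ===== PORT A =====
-- State of A's loop: (novo_conteudo, inseriu_0500, pos_0450).
-- pos_0450 is always a nonnegative list length, so Python's novo[:pos]/novo[pos:] are exactly take/drop.
def insert_0500_after_0450 (linhas : List String) (registros_0500 : List String) : List String :=
  let st := linhas.foldl
    (fun (st : List String × Bool × Nat) linha =>
      let novo := st.1 ++ [linha]
      if PySem.Str.startswith linha "|0450|" then (novo, st.2.1, novo.length)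
      else if PySem.Str.startswith linha "|0990|" && !st.2.1 then
        (novo.take st.2.2 ++ registros_0500 ++ novo.drop st.2.2, true, st.2.2)
      else (novo, st.2.1, st.2.2))
    ([], false, 0)
  if !st.2.1 then st.1.take st.2.2 ++ registros_0500 ++ st.1.drop st.2.2 else st.1

-- ===== PORT B =====
-- Source B's first loop (enumerate + break): index of the first '|0990|' line, or the length.
def pvLimite : List String → Nat
  | [] => 0
  | linha :: rest => if PySem.Str.startswith linha "|0990|" then 0 else 1 + pvLimite rest

-- Python's enumerate over a list, starting at 0 (indices here are the nonnegative positions, exact).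
def pvEnum : Nat → List String → List (Nat × String)
  | _, [] => []
  | i, l :: rest => (i, l) :: pvEnum (i + 1) rest

-- pos is a nonnegative index ≤ len, so linhas[:pos]/linhas[pos:] are exactly take/drop.
def insert_0500_after_0450_alt (linhas : List String) (registros_0500 : List String) : List String :=
  let limite := pvLimite linhas
  let pos := (pvEnum 0 (linhas.take limite)).foldl
    (fun pos il => if PySem.Str.startswith il.2 "|0450|" then il.1 + 1 else pos) 0
  linhas.take pos ++ registros_0500 ++ linhas.drop pos

-- ===== PRECONDITION & SPEC =====
def Spec_insert_0500_after_0450 (linhas : List String) (registros_0500 : List String) (out : List String) : Prop := out = insert_0500_after_0450_alt linhas registros_0500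
instance (linhas : List String) (registros_0500 : List String) (out : List String) : Decidable (Spec_insert_0500_after_0450 linhas registros_0500 out) := by unfold Spec_insert_0500_after_0450; infer_instance

-- ===== CLAIM (what is proved, stated in full; the proofs are below) =====
def Claim_equal_insert_0500_after_0450 : Prop := ∀ (linhas : List String) (registros_0500 : List String), Dom_insert_0500_after_0450 linhas registros_0500 → Spec_insert_0500_after_0450 linhas registros_0500 (insert_0500_after_0450 linhas registros_0500)

-- ===== LEMMAS AND PROOFS =====
-- Merged one-pass description of the insertion index: scan until the first |0990| line,
-- remembering k+1 for the last |0450| line seen at absolute position k.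
def posRec : List String → Nat → Nat → Nat
  | [], _, p => p
  | l :: rest, k, p =>
    if PySem.Str.startswith l "|0990|" then p
    else if PySem.Str.startswith l "|0450|" then posRec rest (k + 1) (k + 1)
    else posRec rest (k + 1) p

-- abbreviation for A's loop body
def stepA (registros_0500 : List String) (st : List String × Bool × Nat) (linha : String) :
    List String × Bool × Nat :=
  let novo := st.1 ++ [linha]
  if PySem.Str.startswith linha "|0450|" then (novo, st.2.1, novo.length)
  else if PySem.Str.startswith linha "|0990|" && !st.2.1 then
    (novo.take st.2.2 ++ registros_0500 ++ novo.drop st.2.2, true, st.2.2)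
  else (novo, st.2.1, st.2.2)

theorem not_both_prefixes (l : String) (h : PySem.Str.startswith l "|0450|" = true) :
    PySem.Str.startswith l "|0990|" = false := by
  by_contra hc
  have h9 : PySem.Str.startswith l "|0990|" = true := by
    cases hb : PySem.Str.startswith l "|0990|" <;> simp_all
  have p4 := (PySem.Chars.startswith_iff (s := l.toList) (p := "|0450|".toList)).mp (by
    simpa [PySem.Str.startswith] using h)
  have p9 := (PySem.Chars.startswith_iff (s := l.toList) (p := "|0990|".toList)).mp (by
    simpa [PySem.Str.startswith] using h9)
  have := (List.prefix_of_prefix_length_le p4 p9 (by decide)).eq_of_length (by decide)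
  simp at this

theorem foldA_true (registros_0500 : List String) :
    ∀ (ls novo : List String) (p : Nat),
      (ls.foldl (stepA registros_0500) (novo, true, p)).1 = novo ++ ls ∧
      (ls.foldl (stepA registros_0500) (novo, true, p)).2.1 = true := by
  intro ls
  induction ls with
  | nil => intro novo p; simp
  | cons l rest ih =>
    intro novo p
    simp only [List.foldl_cons]
    by_cases h450 : PySem.Str.startswith l "|0450|" = true
    · have e : stepA registros_0500 (novo, true, p) l = (novo ++ [l], true, (novo ++ [l]).length) := by
        unfold stepA; rw [if_pos h450]
      rw [e]
      obtain ⟨e1, e2⟩ := ih (novo ++ [l]) ((novo ++ [l]).length)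
      exact ⟨by rw [e1]; simp, e2⟩
    · have e : stepA registros_0500 (novo, true, p) l = (novo ++ [l], true, p) := by
        unfold stepA
        rw [if_neg h450, if_neg (by simp)]
      rw [e]
      obtain ⟨e1, e2⟩ := ih (novo ++ [l]) p
      exact ⟨by rw [e1]; simp, e2⟩

-- main invariant: running A's loop + final splice from an uninserted state
theorem mainA (registros_0500 : List String) :
    ∀ (ls acc : List String) (p : Nat), p ≤ acc.length →
      (let st := ls.foldl (stepA registros_0500) (acc, false, p)
       if !st.2.1 then st.1.take st.2.2 ++ registros_0500 ++ st.1.drop st.2.2 else st.1) =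
        (acc ++ ls).take (posRec ls acc.length p) ++ registros_0500 ++
          (acc ++ ls).drop (posRec ls acc.length p) := by
  intro ls
  induction ls with
  | nil => intro acc p _; simp [posRec]
  | cons l rest ih =>
    intro acc p hp
    simp only [List.foldl_cons]
    by_cases h450 : PySem.Str.startswith l "|0450|" = true
    · have h990 := not_both_prefixes l h450
      have e : stepA registros_0500 (acc, false, p) l =
          (acc ++ [l], false, (acc ++ [l]).length) := by
        unfold stepA; rw [if_pos h450]
      rw [e, ih (acc ++ [l]) ((acc ++ [l]).length) le_rfl]
      have ep : posRec (l :: rest) acc.length p = posRec rest (acc.length + 1) (acc.length + 1) := by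
        simp only [posRec]; rw [if_neg (by rw [h990]; decide), if_pos h450]
      rw [ep]
      simp
    · by_cases h990 : PySem.Str.startswith l "|0990|" = true
      · have e : stepA registros_0500 (acc, false, p) l =
            ((acc ++ [l]).take p ++ registros_0500 ++ (acc ++ [l]).drop p, true, p) := by
          unfold stepA
          rw [if_neg h450, if_pos (by rw [h990]; rfl)]
      -- after insertion the loop only appends
        rw [e]
        obtain ⟨e1, e2⟩ := foldA_true registros_0500 rest
          ((acc ++ [l]).take p ++ registros_0500 ++ (acc ++ [l]).drop p) p
        have ep : posRec (l :: rest) acc.length p = p := by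
          simp only [posRec]; rw [if_pos h990]
        rw [ep]
        simp only [e2, Bool.not_true, Bool.false_eq_true, if_false, e1]
        have tEq2 : (acc ++ [l]).take p = acc.take p := List.take_append_of_le_length hp
        have dEq2 : (acc ++ [l]).drop p = acc.drop p ++ [l] := List.drop_append_of_le_length hp
        have tEq : (acc ++ l :: rest).take p = acc.take p := List.take_append_of_le_length hp
        have dEq : (acc ++ l :: rest).drop p = acc.drop p ++ l :: rest :=
          List.drop_append_of_le_length hp
        rw [tEq2, dEq2, tEq, dEq]
        simp
      · have e : stepA registros_0500 (acc, false, p) l = (acc ++ [l], false, p) := by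
          unfold stepA
          rw [if_neg h450, if_neg (by simp only [Bool.not_false, Bool.and_true]; exact h990)]
        rw [e, ih (acc ++ [l]) p (by simp; omega)]
        have ep : posRec (l :: rest) acc.length p = posRec rest (acc.length + 1) p := by
          simp only [posRec]; rw [if_neg h990, if_neg h450]
        rw [ep]
        simp

-- bridge: B's two separate passes compute exactly posRec
theorem bridgeB :
    ∀ (ls : List String) (k p : Nat),
      ((pvEnum k (ls.take (pvLimite ls))).foldl
        (fun pos il => if PySem.Str.startswith il.2 "|0450|" then il.1 + 1 else pos) p) =
        posRec ls k p := by
  intro ls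
  induction ls with
  | nil => intro k p; simp [pvLimite, posRec, pvEnum]
  | cons l rest ih =>
    intro k p
    by_cases h990 : PySem.Str.startswith l "|0990|" = true
    · have e1 : pvLimite (l :: rest) = 0 := by simp only [pvLimite]; rw [if_pos h990]
      have e2 : posRec (l :: rest) k p = p := by simp only [posRec]; rw [if_pos h990]
      rw [e1, e2]
      simp [pvEnum]
    · have e1 : pvLimite (l :: rest) = 1 + pvLimite rest := by
        simp only [pvLimite]; rw [if_neg h990]
      rw [e1]
      have e2 : (l :: rest).take (1 + pvLimite rest) = l :: rest.take (pvLimite rest) := by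
        simp [Nat.add_comm]
      rw [e2]
      simp only [pvEnum, List.foldl_cons]
      by_cases h450 : PySem.Str.startswith l "|0450|" = true
      · rw [if_pos h450]
        have ep : posRec (l :: rest) k p = posRec rest (k + 1) (k + 1) := by
          simp only [posRec]; rw [if_neg h990, if_pos h450]
        rw [ep]; exact ih (k + 1) (k + 1)
      · rw [if_neg h450]
        have ep : posRec (l :: rest) k p = posRec rest (k + 1) p := by
          simp only [posRec]; rw [if_neg h990, if_neg h450]
        rw [ep]; exact ih (k + 1) p

-- ===== VERDICT (by name: the statement is the Claim_ definition above) =====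
theorem insert_0500_after_0450_spec : Claim_equal_insert_0500_after_0450 := by
  intro linhas registros_0500 _
  show insert_0500_after_0450 linhas registros_0500 = insert_0500_after_0450_alt linhas registros_0500
  have h1 : insert_0500_after_0450 linhas registros_0500 =
      linhas.take (posRec linhas 0 0) ++ registros_0500 ++ linhas.drop (posRec linhas 0 0) := by
    have hA := mainA registros_0500 linhas [] 0 (by simp)
    simp only [List.nil_append, List.length_nil] at hA
    exact hA
  have h2 : insert_0500_after_0450_alt linhas registros_0500 =
      linhas.take (posRec linhas 0 0) ++ registros_0500 ++ linhas.drop (posRec linhas 0 0) := by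
    simp only [insert_0500_after_0450_alt, bridgeB]
  rw [h1, h2]
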